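-- pv_equiv track=rewrite | github.com/Anna325/MD_Goncharova | src/ud/saver.py | sortTags
-- ===== SOURCE A (Python) =====
-- import collections
--
-- TAGS_ORDER = [
--     'noun',
--     'propn',
--     'pron',
--     'det',
--     'adj',
--     'num',
--     'conj',
--     'adv',
--     'part',
--     'adp',
--     'aux',
--     'verb',
--     'intj',
--     'sym',
--     'punct',
--     'x',
--     'h', # непонятно, что это
--     'gender=masc',
--     'gender=fem',
--     'gender=neut',
--     'animacy=anim',
--     'animacy=inan',
--     'number=sing',
--     'number=coll',
--     'number=plur',
--     'number=ptan',
--     'case=nom',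
--     'case=gen',
--     'case=dat',
--     'case=acc',
--     'case=loc',
--     'case=ins',
--     'aspect=imp',
--     'aspect=perf',
--     'mood=ind',
--     'mood=cnd',
--     'mood=imp',
--     'person=1',
--     'person=2',
--     'person=3',
--     'poss=yes',
--     'reflex=yes',
--     'tense=past',
--     'tense=pres',
--     'tense=fut',
--     'verbform=fin',
--     'verbform=inf',
--     'verbform=part',
--     'verbform=trans',
--     'voice=act',
--     'voice=mid',
--     'voice=pass',
--     'degree=pos',
--     'degree=cmp',
--     'degree=sup',
--     'nametype=geo',
--     'nametype=prs',
--     'nametype=giv',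
--     'nametype=sur',
--     'nametype=com',
--     'nametype=pro',
--     'nametype=oth',
-- ]
--
-- def sortTags(tags):
--     tagsDict = {}
--     for tag in tags:
--         if not tag:
--             continue
--         index = TAGS_ORDER.index(tag.lower())
--         tagsDict[index] = tag
--     tagsDict = collections.OrderedDict(sorted(tagsDict.items()))
--     sortedTags = []
--     for key, value in tagsDict.items():
--         sortedTags.append(value)
--     return sortedTags
-- ===== SOURCE B (Python) =====
-- TAGS_ORDER = (
--     "noun propn pron det adj num conj adv part adp aux verb intj sym punct x h "
--     "gender=masc gender=fem gender=neut animacy=anim animacy=inan "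
--     "number=sing number=coll number=plur number=ptan "
--     "case=nom case=gen case=dat case=acc case=loc case=ins "
--     "aspect=imp aspect=perf mood=ind mood=cnd mood=imp "
--     "person=1 person=2 person=3 poss=yes reflex=yes "
--     "tense=past tense=pres tense=fut "
--     "verbform=fin verbform=inf verbform=part verbform=trans "
--     "voice=act voice=mid voice=pass degree=pos degree=cmp degree=sup "
--     "nametype=geo nametype=prs nametype=giv nametype=sur "
--     "nametype=com nametype=pro nametype=oth"
-- ).split()
--
-- def sortTags(tags):
--     # validate: any non-empty tag whose lowercase is unknown is an error (as in A)
--     for tag in tags: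
--         if tag and tag.lower() not in TAGS_ORDER:
--             raise ValueError(f"unknown tag: {tag!r}")
--     # sweep the fixed order; for each order entry emit the LAST matching input tag
--     result = []
--     for t in TAGS_ORDER:
--         for tag in reversed(tags):
--             if tag and tag.lower() == t:
--                 result.append(tag)
--                 break
--     return result
-- ===== Notes on version B (the rewrite author's own statement) =====
-- stated objective: alternative
-- what changed: A keys a dict by TAGS_ORDER indices, sorts its items and collects the values; B uses no dict and no sort at all: it validates the tags, then sweeps the fixed TAGS_ORDER list once and, for each order entry, reverse-scans the input for the last non-empty tag whose lowercase matches it (last-wins, as A's dict overwrite gives).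
import Mathlib
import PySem

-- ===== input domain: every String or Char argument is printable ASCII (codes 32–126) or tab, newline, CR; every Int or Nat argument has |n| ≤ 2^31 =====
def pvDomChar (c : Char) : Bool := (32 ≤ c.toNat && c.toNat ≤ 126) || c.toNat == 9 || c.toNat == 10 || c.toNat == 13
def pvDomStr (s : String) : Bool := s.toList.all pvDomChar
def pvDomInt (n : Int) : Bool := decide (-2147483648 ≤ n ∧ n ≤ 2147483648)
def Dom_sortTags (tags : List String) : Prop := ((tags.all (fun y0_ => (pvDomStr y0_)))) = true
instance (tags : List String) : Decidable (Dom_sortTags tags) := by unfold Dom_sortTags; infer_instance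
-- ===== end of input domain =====

-- B drops A's index-keyed dict + sort entirely: it sweeps the fixed order list once and, for each
-- order entry, reverse-scans the input for the last matching tag (objective: alternative).

def TAGS_ORDER : List String :=
  ["noun", "propn", "pron", "det", "adj", "num", "conj", "adv", "part",
   "adp", "aux", "verb", "intj", "sym", "punct", "x", "h",
   "gender=masc", "gender=fem", "gender=neut",
   "animacy=anim", "animacy=inan",
   "number=sing", "number=coll", "number=plur", "number=ptan",
   "case=nom", "case=gen", "case=dat", "case=acc", "case=loc", "case=ins",
   "aspect=imp", "aspect=perf",
   "mood=ind", "mood=cnd", "mood=imp",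
   "person=1", "person=2", "person=3",
   "poss=yes", "reflex=yes",
   "tense=past", "tense=pres", "tense=fut",
   "verbform=fin", "verbform=inf", "verbform=part", "verbform=trans",
   "voice=act", "voice=mid", "voice=pass",
   "degree=pos", "degree=cmp", "degree=sup",
   "nametype=geo", "nametype=prs", "nametype=giv", "nametype=sur",
   "nametype=com", "nametype=pro", "nametype=oth"]

-- ===== PORT A =====
-- the loop body of A: skip falsy tags, key the dict by TAGS_ORDER.index(tag.lower()).
-- TAGS_ORDER.index raises ValueError when tag.lower() is absent — exactly the inputs Pre_ excludes;
-- there index? is none and the `.getD 0` default is never the value A computes (outside Pre_ nothing is claimed).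
def stepA (d : PySem.Dict Int String) (tag : String) : PySem.Dict Int String :=
  if tag = "" then d
  else d.insert (((PySem.List.index? TAGS_ORDER (PySem.Str.lower tag)).getD 0 : Nat) : Int) tag

def sortTags (tags : List String) : List String :=
  -- tagsDict[index] = tag loop
  let d := tags.foldl stepA PySem.Dict.empty
  -- sorted(tagsDict.items()) sorts (index, tag) pairs as Python tuples, then the values are collected
  (PySem.List.sorted2 d.items (fun p => p.1) (fun p => p.2) false).map (fun p => p.2)

-- ===== PORT B =====
-- Source B builds its order list as one space-separated literal split by str.split()
def ORDER_B : List String :=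
  PySem.Str.split₀ ("noun propn pron det adj num conj adv part adp aux verb intj sym punct x h gender=masc gender=fem gender=neut animacy=anim animacy=inan number=sing number=coll number=plur number=ptan case=nom case=gen case=dat case=acc case=loc case=ins aspect=imp aspect=perf mood=ind mood=cnd mood=imp person=1 person=2 person=3 poss=yes reflex=yes tense=past tense=pres tense=fut verbform=fin verbform=inf verbform=part verbform=trans voice=act voice=mid voice=pass degree=pos degree=cmp degree=sup nametype=geo nametype=prs nametype=giv nametype=sur nametype=com nametype=pro nametype=oth")

-- the inner reverse scan: the last non-empty input tag whose lowercase equals t.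
-- B's validation loop raises ValueError exactly on the inputs Pre_ excludes (no value to port there).
def lastMatch (tags : List String) (t : String) : Option String :=
  tags.reverse.find? (fun tag => !(tag == "") && PySem.Str.lower tag == t)

def sortTags_alt (tags : List String) : List String :=
  ORDER_B.filterMap (fun t => lastMatch tags t)

-- ===== PRECONDITION & SPEC =====
-- Pre_ excludes exactly the inputs on which A raises ValueError (a non-empty tag whose
-- lowercase is not in TAGS_ORDER); A returns on every input satisfying Pre_.
def Pre_sortTags (tags : List String) : Prop :=
  ∀ t ∈ tags, t = "" ∨ PySem.Str.lower t ∈ TAGS_ORDER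
instance (tags : List String) : Decidable (Pre_sortTags tags) := by unfold Pre_sortTags; infer_instance

def pvWitness_sortTags : List String := ["NOUN", "", "case=nom", "Noun"]

def Spec_sortTags (tags : List String) (out : List String) : Prop := out = sortTags_alt tags
instance (tags : List String) (out : List String) : Decidable (Spec_sortTags tags out) := by unfold Spec_sortTags; infer_instance

-- ===== CLAIM (what is proved, stated in full; the proofs are below) =====
def Claim_equal_sortTags : Prop := ∀ (tags : List String), Dom_sortTags tags → Pre_sortTags tags → Spec_sortTags tags (sortTags tags)

-- ===== LEMMAS AND PROOFS =====

set_option maxRecDepth 20000 in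
set_option maxHeartbeats 2000000 in
theorem orderB_eq : ORDER_B = TAGS_ORDER := by decide

theorem tagsOrder_nodup : TAGS_ORDER.Nodup := by decide

-- insertBy only compares the inserted element with list members: congruent `before`s agree
theorem insertBy_congr {α : Type} (b b' : α → α → Bool) (x : α) (ys : List α)
    (h : ∀ y ∈ ys, b x y = b' x y) :
    PySem.List.insertBy b x ys = PySem.List.insertBy b' x ys := by
  induction ys with
  | nil => rfl
  | cons y ys ih =>
    simp only [PySem.List.insertBy, h y (List.mem_cons_self)]
    split
    · rfl
    · rw [ih (fun z hz => h z (List.mem_cons_of_mem _ hz))]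

theorem foldl_insertBy_congr {α : Type} (b b' : α → α → Bool) (xs acc : List α)
    (h : ∀ x ∈ xs, ∀ y, (y ∈ acc ∨ y ∈ xs) → b x y = b' x y) :
    xs.foldl (fun a x => PySem.List.insertBy b x a) acc
      = xs.foldl (fun a x => PySem.List.insertBy b' x a) acc := by
  induction xs generalizing acc with
  | nil => rfl
  | cons x xs ih =>
    simp only [List.foldl_cons]
    rw [insertBy_congr b b' x acc
      (fun y hy => h x (List.mem_cons_self) y (Or.inl hy))]
    exact ih _ (fun x' hx' y hy => by
      rcases hy with hy | hy
      · rcases (PySem.List.mem_insertBy _ _ _ _).mp hy with rfl | hy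
        · exact h x' (List.mem_cons_of_mem _ hx') y (Or.inr List.mem_cons_self)
        · exact h x' (List.mem_cons_of_mem _ hx') y (Or.inl hy)
      · exact h x' (List.mem_cons_of_mem _ hx') y (Or.inr (List.mem_cons_of_mem _ hy)))

-- a tuple sort whose first key separates the elements is the first-key sort
theorem sorted2_eq_sorted (xs : List (Int × String))
    (h : ∀ a ∈ xs, ∀ b ∈ xs, a ≠ b → a.1 ≠ b.1) :
    PySem.List.sorted2 xs (fun p => p.1) (fun p => p.2) false
      = PySem.List.sorted xs (fun p => p.1) false := by
  unfold PySem.List.sorted2 PySem.List.sorted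
  simp only [if_neg (by decide : ¬ (false = true))]
  apply foldl_insertBy_congr
  intro a ha y hy
  rcases hy with hy | hy
  · cases hy
  · by_cases hab : a = y
    · subst hab; simp
    · have hne := h a ha y hy hab
      rcases lt_trichotomy a.1 y.1 with hlt | heq | hgt
      · simp [hlt, not_lt_of_gt hlt]
      · exact absurd heq hne
      · simp [hgt, not_lt_of_gt hgt]

theorem filterMap_eq_range {α β : Type} (xs : List α) (g : α → Option β) :
    xs.filterMap g = (List.range xs.length).filterMap (fun i => xs[i]?.bind g) := by
  induction xs using List.reverseRecOn with
  | nil => rfl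
  | append_singleton xs x ih =>
    rw [List.filterMap_append, List.length_append, List.length_singleton,
      List.range_succ, List.filterMap_append, ih]
    congr 1
    · apply List.filterMap_congr
      intro i hi
      rw [List.getElem?_append_left (List.mem_range.mp hi)]
    · have : (xs ++ [x])[xs.length]? = some x := by
        rw [List.getElem?_append_right (le_refl _)]
        simp
      simp only [List.filterMap_cons, List.filterMap_nil, this, Option.bind_some]

-- A's final sort, characterised: with keys that are distinct indices into TAGS_ORDER,
-- sorted(items) is the index sweep
theorem sorted_items_eq (d : PySem.Dict Int String)
    (hnd : d.keys.Nodup)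
    (hr : ∀ k ∈ d.keys, ∃ i : Nat, i < TAGS_ORDER.length ∧ k = (i : Int)) :
    PySem.List.sorted d.items (fun p => p.1) false
      = (List.range TAGS_ORDER.length).filterMap
          (fun (i : Nat) => (d.get? (i : Int)).map (fun v => ((i : Int), v))) := by
  have hitems : d.items.Nodup := by
    exact List.Nodup.of_map (fun p => p.1) (by simpa [PySem.Dict.keys] using hnd)
  have hpair : ((List.range TAGS_ORDER.length).filterMap
      (fun (i : Nat) => (d.get? (i : Int)).map (fun v => ((i : Int), v)))).Pairwise
      (fun a b => a.1 < b.1) := by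
    refine List.Pairwise.filterMap _ ?_ List.pairwise_lt_range
    intro i j hij x hx y hy
    rcases Option.map_eq_some_iff.mp hx with ⟨v, _, rfl⟩
    rcases Option.map_eq_some_iff.mp hy with ⟨w, _, rfl⟩
    show (i : Int) < (j : Int)
    exact_mod_cast hij
  apply PySem.List.sorted_eq_of_perm_of_pairwise_lt
  · apply (List.perm_ext_iff_of_nodup ?_ hitems).mpr
    · intro p
      constructor
      · intro hp
        rcases List.mem_filterMap.mp hp with ⟨i, hi, hmap⟩
        rcases Option.map_eq_some_iff.mp hmap with ⟨v, hv, rfl⟩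
        exact PySem.Dict.mem_items_of_get?_eq_some d hv
      · intro hp
        have hget : d.get? p.1 = some p.2 := PySem.Dict.get?_of_mem_items d (by simpa using hp) hnd
        rcases hr p.1 (PySem.Dict.mem_keys_of_mem_items d hp) with ⟨i, hi, hk⟩
        refine List.mem_filterMap.mpr ⟨i, List.mem_range.mpr hi, ?_⟩
        rw [← hk, hget]
        simp
    · exact hpair.imp (fun {a b} hab => by
        intro h; exact absurd (congrArg Prod.fst h) (ne_of_lt hab))
  · exact hpair

-- the loop invariant tying A's dict to B's reverse scan: at each in-range index, A's dict holds
-- exactly the last non-empty tag whose lowercase is the order entry at that index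
theorem fold_inv (tags : List String)
    (hpre : ∀ t ∈ tags, t = "" ∨ PySem.Str.lower t ∈ TAGS_ORDER)
    (dA : PySem.Dict Int String)
    (hnd : dA.keys.Nodup)
    (hr : ∀ k ∈ dA.keys, ∃ i : Nat, i < TAGS_ORDER.length ∧ k = (i : Int)) :
    (tags.foldl stepA dA).keys.Nodup
    ∧ (∀ k ∈ tags.foldl stepA dA |>.keys, ∃ i : Nat, i < TAGS_ORDER.length ∧ k = (i : Int))
    ∧ (∀ i : Nat, i < TAGS_ORDER.length →
        (tags.foldl stepA dA).get? (i : Int)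
          = (lastMatch tags (TAGS_ORDER.getD i "")).or (dA.get? (i : Int))) := by
  induction tags generalizing dA with
  | nil => exact ⟨hnd, hr, fun i _ => rfl⟩
  | cons t ts ih =>
    simp only [List.foldl_cons]
    by_cases ht : t = ""
    · simp only [stepA, if_pos ht]
      obtain ⟨h1, h2, h3⟩ := ih (fun u hu => hpre u (List.mem_cons_of_mem _ hu)) dA hnd hr
      refine ⟨h1, h2, fun i hi => ?_⟩
      rw [h3 i hi]
      simp [lastMatch, List.find?_append, ht]
    · have hmem : PySem.Str.lower t ∈ TAGS_ORDER :=
        (hpre t List.mem_cons_self).resolve_left ht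
      obtain ⟨j, hj⟩ : ∃ j, PySem.List.index? TAGS_ORDER (PySem.Str.lower t) = some j :=
        Option.isSome_iff_exists.mp ((PySem.List.index?_isSome_iff _ _).mpr hmem)
      obtain ⟨hjlt, hjget, -⟩ := PySem.List.getElem_of_index?_eq_some hj
      simp only [stepA, if_neg ht, hj, Option.getD_some]
      obtain ⟨h1, h2, h3⟩ := ih (fun u hu => hpre u (List.mem_cons_of_mem _ hu))
        (dA.insert (j : Int) t)
        (PySem.Dict.nodup_keys_insert dA _ t hnd)
        (by
          intro k hk
          rcases (PySem.Dict.mem_keys_insert dA _ k t).mp hk with rfl | hk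
          · exact ⟨j, hjlt, rfl⟩
          · exact hr k hk)
      refine ⟨h1, h2, fun i hi => ?_⟩
      rw [h3 i hi, PySem.Dict.get?_insert]
      have hiff : ((i : Int) = (j : Int)) ↔ (TAGS_ORDER.getD i "" = PySem.Str.lower t) := by
        rw [List.getD_eq_getElem _ _ hi]
        constructor
        · intro h
          have : i = j := by exact_mod_cast h
          subst this; exact hjget
        · intro h
          have := (List.Nodup.getElem_inj_iff tagsOrder_nodup).mp (h.trans hjget.symm)
          exact_mod_cast this
      have hsplit : lastMatch (t :: ts) (TAGS_ORDER.getD i "")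
          = (lastMatch ts (TAGS_ORDER.getD i "")).or
              (if PySem.Str.lower t = TAGS_ORDER.getD i "" then some t else none) := by
        have hb : (t == "") = false := beq_eq_false_iff_ne.mpr ht
        simp only [lastMatch, List.reverse_cons, List.find?_append]
        congr 1
        by_cases hc : PySem.Str.lower t = TAGS_ORDER.getD i ""
        · rw [List.find?_cons_of_pos (by simp [hb, hc]), if_pos hc]
        · rw [List.find?_cons_of_neg (by simp [hb]; rw [← List.getD_eq_getElem?_getD]; exact hc), List.find?_nil, if_neg hc]
      rw [hsplit]
      by_cases hcase : (i : Int) = (j : Int)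
      · rw [if_pos hcase, if_pos (hiff.mp hcase).symm]
        cases lastMatch ts (TAGS_ORDER.getD i "") <;> rfl
      · rw [if_neg hcase, if_neg (fun h => hcase (hiff.mpr h.symm))]
        cases lastMatch ts (TAGS_ORDER.getD i "") <;> rfl

-- ===== VERDICT (by name: the statement is the Claim_ definition above) =====
theorem sortTags_spec : Claim_equal_sortTags := by
  intro tags _ hpre
  unfold Spec_sortTags sortTags sortTags_alt
  dsimp only
  obtain ⟨hnd, hr, hc⟩ := fold_inv tags hpre PySem.Dict.empty
    PySem.Dict.nodup_keys_empty
    (by intro k hk; simp [PySem.Dict.keys_empty] at hk)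
  have hfst : ∀ a ∈ (tags.foldl stepA PySem.Dict.empty).items,
      ∀ b ∈ (tags.foldl stepA PySem.Dict.empty).items, a ≠ b → a.1 ≠ b.1 := by
    intro a ha b hb hab h1
    have h2 : (tags.foldl stepA PySem.Dict.empty).get? a.1 = some a.2 :=
      PySem.Dict.get?_of_mem_items _ (by simpa using ha) hnd
    have h3 : (tags.foldl stepA PySem.Dict.empty).get? b.1 = some b.2 :=
      PySem.Dict.get?_of_mem_items _ (by simpa using hb) hnd
    rw [h1, h3] at h2
    exact hab (Prod.ext_iff.mpr ⟨h1, (Option.some.injEq _ _ ▸ h2 : b.2 = a.2).symm⟩)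
  rw [sorted2_eq_sorted _ hfst, sorted_items_eq _ hnd hr, List.map_filterMap,
    orderB_eq, filterMap_eq_range TAGS_ORDER]
  apply List.filterMap_congr
  intro i hi
  have hi' := List.mem_range.mp hi
  rw [List.getElem?_eq_getElem hi', Option.bind_some,
    ← List.getD_eq_getElem TAGS_ORDER "" hi', hc i hi', PySem.Dict.get?_empty]
  cases lastMatch tags (TAGS_ORDER.getD i "") <;> rfl
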